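-- pv_equiv track=rewrite | github.com/mcas2/python-basics | resolviendo_dudas.py | pintarLineaConEspacios
-- ===== SOURCE A (Python) =====
-- def pintarLineaConEspacios(longitud, simbolo):
--     lineaConEspacios = ""
--     for j in range(longitud):
--         if (j == 0 or j == longitud-1):
--             lineaConEspacios += simbolo
--         else:
--             lineaConEspacios += " "
--     return lineaConEspacios
-- ===== SOURCE B (Python) =====
-- def pintarLineaConEspacios(longitud, simbolo):
--     if longitud <= 0:
--         return ""
--     if longitud == 1:
--         return simbolo
--     return simbolo + " " * (longitud - 2) + simbolo
-- ===== Notes on version B (the rewrite author's own statement) =====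
-- stated objective: simpler
-- what changed: Replaces the character-by-character loop over range(longitud) with a closed-form expression: two guard branches plus simbolo + ' '*(longitud-2) + simbolo.
import Mathlib
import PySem

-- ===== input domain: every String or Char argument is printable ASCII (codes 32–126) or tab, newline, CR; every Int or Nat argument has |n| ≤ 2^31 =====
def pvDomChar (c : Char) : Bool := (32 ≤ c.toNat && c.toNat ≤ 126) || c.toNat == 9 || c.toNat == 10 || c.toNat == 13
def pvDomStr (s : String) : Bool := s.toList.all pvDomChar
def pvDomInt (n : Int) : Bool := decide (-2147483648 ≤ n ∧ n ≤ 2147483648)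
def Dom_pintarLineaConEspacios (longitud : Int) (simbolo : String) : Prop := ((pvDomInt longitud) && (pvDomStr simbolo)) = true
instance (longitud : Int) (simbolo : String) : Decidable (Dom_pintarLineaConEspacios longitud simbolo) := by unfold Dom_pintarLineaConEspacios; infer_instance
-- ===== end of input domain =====

-- B replaces A's per-character accumulation loop with a closed-form expression (two guards plus one concatenation).

-- ===== PORT A =====
-- literal transliteration: the for-loop over range(longitud) becomes a foldl over pyRange
def pintarLineaConEspacios (longitud : Int) (simbolo : String) : String :=
  (PySem.List.pyRange 0 longitud 1).foldl
    (fun lineaConEspacios j =>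
      if j = 0 ∨ j = longitud - 1 then lineaConEspacios ++ simbolo
      else lineaConEspacios ++ " ")
    ""

-- ===== PORT B =====
-- " " * (longitud - 2) is ported as String.ofList (List.replicate (longitud - 2).toNat ' ')
def pintarLineaConEspacios_alt (longitud : Int) (simbolo : String) : String :=
  if longitud ≤ 0 then ""
  else if longitud = 1 then simbolo
  else simbolo ++ String.ofList (List.replicate (longitud - 2).toNat ' ') ++ simbolo

-- ===== PRECONDITION & SPEC =====
def Spec_pintarLineaConEspacios (longitud : Int) (simbolo : String) (out : String) : Prop := out = pintarLineaConEspacios_alt longitud simbolo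
instance (longitud : Int) (simbolo : String) (out : String) : Decidable (Spec_pintarLineaConEspacios longitud simbolo out) := by unfold Spec_pintarLineaConEspacios; infer_instance

-- ===== CLAIM (what is proved, stated in full; the proofs are below) =====
def Claim_equal_pintarLineaConEspacios : Prop := ∀ (longitud : Int) (simbolo : String), Dom_pintarLineaConEspacios longitud simbolo → Spec_pintarLineaConEspacios longitud simbolo (pintarLineaConEspacios longitud simbolo)

-- ===== LEMMAS AND PROOFS =====

-- folding string-append from `init` is `init ++` the fold from ""
theorem foldl_str_append_init : ∀ (l : List String) (init : String),
    l.foldl (· ++ ·) init = init ++ l.foldl (· ++ ·) ""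
  | [], init => by simp
  | x :: xs, init => by
      simp only [List.foldl_cons]
      rw [foldl_str_append_init xs (init ++ x), foldl_str_append_init xs ("" ++ x)]
      simp [String.append_assoc]

-- folding "append g j" over a list is init ++ the concatenation of the pieces
theorem foldl_append_pieces (g : Int → String) :
    ∀ (l : List Int) (init : String),
      l.foldl (fun acc j => acc ++ g j) init = init ++ (l.map g).foldl (· ++ ·) ""
  | [], init => by simp
  | x :: xs, init => by
      simp only [List.foldl_cons, List.map_cons]
      rw [foldl_append_pieces g xs (init ++ g x), foldl_str_append_init (xs.map g) ("" ++ g x)]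
      simp [String.append_assoc]

-- concatenating k copies of " " is the string of k spaces
theorem concat_replicate_space : ∀ (k : Nat),
    (List.replicate k " ").foldl (· ++ ·) "" = String.ofList (List.replicate k ' ')
  | 0 => by simp
  | k + 1 => by
      rw [List.replicate_succ, List.foldl_cons,
          foldl_str_append_init (List.replicate k " ") ("" ++ " "),
          concat_replicate_space k, List.replicate_succ]
      rw [show (' ' :: List.replicate k ' ') = [' '] ++ List.replicate k ' ' from rfl,
          String.ofList_append]
      rfl

theorem pintarLineaConEspacios_spec_aux (longitud : Int) (simbolo : String) :
    pintarLineaConEspacios longitud simbolo = pintarLineaConEspacios_alt longitud simbolo := by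
  unfold pintarLineaConEspacios pintarLineaConEspacios_alt
  by_cases h0 : longitud ≤ 0
  · rw [PySem.List.pyRange_one_eq_nil h0]
    simp [h0]
  · by_cases h1 : longitud = 1
    · subst h1
      simp [PySem.List.pyRange_one]
    · -- longitud ≥ 2: peel off j = 0 and j = longitud - 1, the middle is all spaces
      rw [PySem.List.pyRange_one_cons (by omega : (0:Int) < longitud)]
      have hsplit : PySem.List.pyRange (0+1) longitud 1
          = PySem.List.pyRange 1 (longitud - 1) 1 ++ [longitud - 1] := by
        have := PySem.List.pyRange_one_succ_right (a := 1) (b := longitud - 1) (by omega)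
        simpa [show longitud - 1 + 1 = longitud by ring] using this
      rw [show (fun (lineaConEspacios : String) (j : Int) =>
            if j = 0 ∨ j = longitud - 1 then lineaConEspacios ++ simbolo
            else lineaConEspacios ++ " ")
          = (fun acc j => acc ++ (if j = 0 ∨ j = longitud - 1 then simbolo else " ")) from by
            funext acc j; split <;> rfl]
      rw [foldl_append_pieces (fun j => if j = 0 ∨ j = longitud - 1 then simbolo else " "), hsplit]
      have hmid : (PySem.List.pyRange 1 (longitud - 1) 1).map
            (fun j => if j = 0 ∨ j = longitud - 1 then simbolo else " ")
          = List.replicate (longitud - 2).toNat " " := by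
        rw [List.map_congr_left (g := fun _ => (" " : String)) (fun x hx => by
          rw [PySem.List.mem_pyRange_one] at hx
          have : ¬ (x = 0 ∨ x = longitud - 1) := by omega
          simp [this])]
        rw [List.map_const', PySem.List.length_pyRange_one]
        congr 1
        omega
      simp only [List.map_append, List.map_cons, List.map_nil, hmid]
      simp only [true_or, or_true, if_true]
      rw [List.foldl_cons,
          foldl_str_append_init (List.replicate (longitud - 2).toNat " " ++ [simbolo]) ("" ++ simbolo),
          List.foldl_append, List.foldl_cons, List.foldl_nil,
          concat_replicate_space]
      rw [if_neg h0, if_neg h1]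
      simp [String.append_assoc]

-- ===== VERDICT (by name: the statement is the Claim_ definition above) =====
theorem pintarLineaConEspacios_spec : Claim_equal_pintarLineaConEspacios := by
  intro longitud simbolo _
  exact pintarLineaConEspacios_spec_aux longitud simbolo
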